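-- pv_equiv track=rewrite | github.com/Eckankar/AdventOfCode | 2021/18/solve.py | parse
-- ===== SOURCE A (Python) =====
-- def parse(l):
--     d = 0
--     res = []
--
--     for c in l:
--         if c == '[':   d += 1
--         elif c == ']': d -= 1
--         elif c == ',': pass
--         else:          res.append( (int(c), d) )
--
--     return res
-- ===== SOURCE B (Python) =====
-- def parse(l):
--     # pass 1: prefix-sum depth table; pass 2: zip chars with depths and emit digits
--     depths = []
--     t = 0
--     for c in l:
--         t += (c == '[') - (c == ']')
--         depths.append(t)
--     return [(int(c), d) for c, d in zip(l, depths) if c not in '[],']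
-- ===== Notes on version B (the rewrite author's own statement) =====
-- stated objective: alternative
-- what changed: B replaces A's single loop threading a running depth and appending results with two passes: it first materialises a prefix-sum depth table for every position, then builds the result as a comprehension over the char/depth zip.
import Mathlib
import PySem

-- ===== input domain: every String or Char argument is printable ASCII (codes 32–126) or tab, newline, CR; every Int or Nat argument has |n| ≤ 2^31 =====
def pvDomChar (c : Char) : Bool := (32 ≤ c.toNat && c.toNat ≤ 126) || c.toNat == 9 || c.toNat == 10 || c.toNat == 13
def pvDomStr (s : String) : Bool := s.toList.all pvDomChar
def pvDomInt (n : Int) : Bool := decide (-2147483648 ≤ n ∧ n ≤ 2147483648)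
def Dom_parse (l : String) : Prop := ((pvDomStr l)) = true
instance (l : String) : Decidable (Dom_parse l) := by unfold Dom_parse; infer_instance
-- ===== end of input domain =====

-- B changes A's single running-counter loop into two passes (a prefix-sum depth
-- table, then a comprehension over the char/depth zip); return values proved equal on Pre_.

-- ===== PORT A =====
-- single loop threading state (d, res); int(c) on a digit char is its value (Pre_ guarantees digits)
def parse (l : String) : List (Int × Int) :=
  (l.toList.foldl
    (fun (st : Int × List (Int × Int)) c =>
      if c = '[' then (st.1 + 1, st.2)
      else if c = ']' then (st.1 - 1, st.2)
      else if c = ',' then st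
      else (st.1, st.2 ++ [((c.toNat : Int) - 48, st.1)]))
    (0, [])).2

-- ===== PORT B =====
-- pass 1: prefix-sum depth table (running total t, appended per char)
-- pass 2: list comprehension over zip(l, depths), keeping chars not in '[],'
def parse_alt (l : String) : List (Int × Int) :=
  let depths :=
    (l.toList.foldl
      (fun (st : Int × List Int) c =>
        let t := st.1 + ((if c = '[' then (1:Int) else 0) - (if c = ']' then (1:Int) else 0))
        (t, st.2 ++ [t]))
      (0, [])).2
  (l.toList.zip depths).filterMap
    (fun p => if p.1 = '[' ∨ p.1 = ']' ∨ p.1 = ',' then none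
              else some ((p.1.toNat : Int) - 48, p.2))

-- ===== PRECONDITION & SPEC =====
-- Pre_ excludes strings containing a character that is neither a bracket, a comma nor a digit: A raises ValueError there (int of a non-digit char).
def Pre_parse (l : String) : Prop :=
  (l.toList.all (fun c => c == '[' || c == ']' || c == ',' || ('0' ≤ c && c ≤ '9'))) = true
instance (l : String) : Decidable (Pre_parse l) := by unfold Pre_parse; infer_instance
def pvWitness_parse : String := "[1]"
def Spec_parse (l : String) (out : List (Int × Int)) : Prop := out = parse_alt l
instance (l : String) (out : List (Int × Int)) : Decidable (Spec_parse l out) := by unfold Spec_parse; infer_instance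

-- ===== CLAIM (what is proved, stated in full; the proofs are below) =====
def Claim_equal_parse : Prop := ∀ (l : String), Dom_parse l → Pre_parse l → Spec_parse l (parse l)

-- ===== LEMMAS AND PROOFS =====

-- depth sequence starting from t
def pvDepths (t : Int) : List Char → List Int
  | [] => []
  | c :: cs =>
      let t' := t + ((if c = '[' then (1:Int) else 0) - (if c = ']' then (1:Int) else 0))
      t' :: pvDepths t' cs

theorem pvDepths_foldl (cs : List Char) (t : Int) (acc : List Int) :
    (cs.foldl
      (fun (st : Int × List Int) c =>
        let t := st.1 + ((if c = '[' then (1:Int) else 0) - (if c = ']' then (1:Int) else 0))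
        (t, st.2 ++ [t]))
      (t, acc)).2 = acc ++ pvDepths t cs := by
  induction cs generalizing t acc with
  | nil => simp [pvDepths]
  | cons c cs ih => simp [pvDepths, ih, List.append_assoc]

theorem pvFoldl_eq (cs : List Char) (d : Int) (res : List (Int × Int)) :
    (cs.foldl
      (fun (st : Int × List (Int × Int)) c =>
        if c = '[' then (st.1 + 1, st.2)
        else if c = ']' then (st.1 - 1, st.2)
        else if c = ',' then st
        else (st.1, st.2 ++ [((c.toNat : Int) - 48, st.1)]))
      (d, res)).2
    = res ++ (cs.zip (pvDepths d cs)).filterMap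
        (fun p => if p.1 = '[' ∨ p.1 = ']' ∨ p.1 = ',' then none
                  else some ((p.1.toNat : Int) - 48, p.2)) := by
  induction cs generalizing d res with
  | nil => simp
  | cons c cs ih =>
      by_cases h1 : c = '['
      · simp [pvDepths, h1, ih]
      · by_cases h2 : c = ']'
        · simp [pvDepths, h2, ih]
          rw [show d + (-1:Int) = d - 1 by ring]
        · by_cases h3 : c = ','
          · simp [pvDepths, h3, ih]
          · simp [pvDepths, h1, h2, h3, ih, List.append_assoc]

-- ===== VERDICT (by name: the statement is the Claim_ definition above) =====
theorem parse_spec : Claim_equal_parse := by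
  intro l _ _
  unfold Spec_parse parse parse_alt
  rw [pvFoldl_eq, pvDepths_foldl]
  simp
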